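-- pv_equiv track=rewrite | github.com/yuxin101/skills | skills/jinzhengxu/fword-skill/scripts/ai_refiner.py | _chunk_latex
-- ===== SOURCE A (Python) =====
-- def _chunk_latex(latex: str, chunk_size: int = 200) -> list[str]:
--     """Split LaTeX into chunks, trying to break at section boundaries."""
--     lines = latex.split("\n")
--     if len(lines) <= chunk_size:
--         return [latex]
--
--     chunks = []
--     current: list[str] = []
--     for line in lines:
--         current.append(line)
--         if len(current) >= chunk_size and (
--             line.startswith("\\section")
--             or line.startswith("\\subsection")
--             or line.startswith("\\chapter")
--             or line.strip() == ""
--         ):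
--             chunks.append("\n".join(current))
--             current = []
--     if current:
--         chunks.append("\n".join(current))
--     return chunks
-- ===== SOURCE B (Python) =====
-- def _is_boundary(line: str) -> bool:
--     return (line.startswith("\\section")
--             or line.startswith("\\subsection")
--             or line.startswith("\\chapter")
--             or line.strip() == "")
--
--
-- def _find_cut(lines: list[str], start: int) -> int | None:
--     """First index >= max(start, 0) in lines holding a boundary line, else None."""
--     i = max(start, 0)
--     while i < len(lines):
--         if _is_boundary(lines[i]):
--             return i
--         i += 1
--     return None
--
--
-- def _chunk_latex(latex: str, chunk_size: int = 200) -> list[str]: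
--     """Split LaTeX into chunks, trying to break at section boundaries."""
--     lines = latex.split("\n")
--     if len(lines) <= chunk_size:
--         return [latex]
--
--     chunks = []
--     rest = lines
--     while rest:
--         cut = _find_cut(rest, chunk_size - 1)
--         if cut is None:
--             chunks.append("\n".join(rest))
--             break
--         chunks.append("\n".join(rest[:cut + 1]))
--         rest = rest[cut + 1:]
--     return chunks
-- ===== Notes on version B (the rewrite author's own statement) =====
-- stated objective: alternative
-- what changed: B replaces A's single-pass accumulator (grow `current`, flush when it is long enough and the line is a boundary) by a recursive decomposition: repeatedly search the remaining lines for the first boundary line at index >= chunk_size-1, cut there with a slice, and recurse on the tail.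
import Mathlib
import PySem

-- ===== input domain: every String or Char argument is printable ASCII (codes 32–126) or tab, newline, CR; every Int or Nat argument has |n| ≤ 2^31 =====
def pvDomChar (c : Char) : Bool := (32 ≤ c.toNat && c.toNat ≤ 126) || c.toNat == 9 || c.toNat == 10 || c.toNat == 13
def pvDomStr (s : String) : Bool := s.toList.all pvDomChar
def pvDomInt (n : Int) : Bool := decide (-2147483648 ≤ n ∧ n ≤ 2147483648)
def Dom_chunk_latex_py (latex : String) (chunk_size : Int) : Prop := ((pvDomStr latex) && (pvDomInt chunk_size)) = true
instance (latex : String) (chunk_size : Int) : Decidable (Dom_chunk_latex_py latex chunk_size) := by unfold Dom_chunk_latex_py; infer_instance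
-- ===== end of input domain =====

-- B restates A's greedy chunking as "find the first boundary at index >= chunk_size-1, cut, recurse"
-- over the remaining lines (objective: alternative decomposition, same cost).

-- ===== PORT A =====
-- latex.split("\n"): PySem.Str.split? is exact; the separator "\n" is nonempty, so it is
-- always `some` and getD never supplies the default. (Used by both ports, as both Pythons call it.)
def pySplitNL (s : String) : List String := (PySem.Str.split? s "\n").getD []

-- A: one pass, accumulating `current` and flushing it when long enough at a boundary line.
def chunk_latex_py (latex : String) (chunk_size : Int) : List String :=
  let lines := pySplitNL latex
  if (lines.length : Int) ≤ chunk_size then [latex]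
  else
    let st := lines.foldl (fun (st : List String × List String) line =>
      let current := st.2 ++ [line]
      if (current.length : Int) ≥ chunk_size &&
         (PySem.Str.startswith line "\\section" || PySem.Str.startswith line "\\subsection" ||
          PySem.Str.startswith line "\\chapter" || (PySem.Str.strip line == "")) then
        (st.1 ++ [PySem.Str.join "\n" current], [])
      else (st.1, current)) ([], [])
    if st.2.isEmpty then st.1 else st.1 ++ [PySem.Str.join "\n" st.2]

-- ===== PORT B =====
-- Source B's _is_boundary
def bLine (line : String) : Bool :=
  PySem.Str.startswith line "\\section" || PySem.Str.startswith line "\\subsection" ||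
  PySem.Str.startswith line "\\chapter" || (PySem.Str.strip line == "")

-- Source B's _find_cut: linear scan from index max(start,0); here the caller passes the
-- already-clamped Nat index ((chunk_size-1).toNat = max(chunk_size-1, 0)).
def bFindCut (lines : List String) (i : Nat) : Option Nat :=
  if h : i < lines.length then
    if bLine lines[i] then some i else bFindCut lines (i + 1)
  else none
termination_by lines.length - i

-- needed by bChunks's termination proof (cited in decreasing_by)
theorem bFindCut_lt (lines : List String) (i j : Nat) (h : bFindCut lines i = some j) :
    j < lines.length := by
  unfold bFindCut at h
  split at h
  · rename_i hlen
    split at h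
    · simp only [Option.some.injEq] at h; omega
    · exact bFindCut_lt lines (i + 1) j h
  · simp at h
termination_by lines.length - i

-- Source B's while-loop: cut at the first boundary index >= chunk_size-1, recurse on the tail
def bChunks (chunk_size : Int) (rest : List String) : List String :=
  if hr : rest = [] then []
  else
    match hc : bFindCut rest (chunk_size - 1).toNat with
    | none => [PySem.Str.join "\n" rest]
    | some cut =>
        PySem.Str.join "\n" (PySem.List.slice rest none (some ((cut : Int) + 1))) ::
        bChunks chunk_size (PySem.List.slice rest (some ((cut : Int) + 1)) none)
termination_by rest.length
decreasing_by
  have hlt := bFindCut_lt rest _ cut hc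
  rw [PySem.List.slice_from _ (by omega : (0:Int) ≤ (cut : Int) + 1)]
  simp only [List.length_drop]
  have : rest.length ≠ 0 := by
    intro h0; exact hr (List.eq_nil_of_length_eq_zero h0)
  omega

def chunk_latex_py_alt (latex : String) (chunk_size : Int) : List String :=
  let lines := pySplitNL latex
  if (lines.length : Int) ≤ chunk_size then [latex]
  else bChunks chunk_size lines

-- ===== PRECONDITION & SPEC =====
def Spec_chunk_latex_py (latex : String) (chunk_size : Int) (out : List String) : Prop := out = chunk_latex_py_alt latex chunk_size
instance (latex : String) (chunk_size : Int) (out : List String) : Decidable (Spec_chunk_latex_py latex chunk_size out) := by unfold Spec_chunk_latex_py; infer_instance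

-- ===== CLAIM (what is proved, stated in full; the proofs are below) =====
def Claim_equal_chunk_latex_py : Prop := ∀ (latex : String) (chunk_size : Int), Dom_chunk_latex_py latex chunk_size → Spec_chunk_latex_py latex chunk_size (chunk_latex_py latex chunk_size)

-- ===== LEMMAS AND PROOFS =====

-- A's loop body and its finalisation, named (definitionally equal to the inline code in the port)
def aStep (cs : Int) (st : List String × List String) (line : String) : List String × List String :=
  let current := st.2 ++ [line]
  if (current.length : Int) ≥ cs && bLine line then
    (st.1 ++ [PySem.Str.join "\n" current], [])
  else (st.1, current)

def finA (st : List String × List String) : List String :=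
  if st.2.isEmpty then st.1 else st.1 ++ [PySem.Str.join "\n" st.2]

-- first index i of rest with (k + i + 1 ≥ cs) and bLine rest[i]: A's cut condition with k lines pending
def fc2 (cs : Int) (k : Nat) : List String → Option Nat
  | [] => none
  | line :: rest =>
      if ((k : Int) + 1 ≥ cs && bLine line) then some 0 else (fc2 cs (k + 1) rest).map (· + 1)

theorem fc2_findIdx (cs : Int) (rest : List String) : ∀ (k : Nat),
    fc2 cs k rest = (List.findIdx? bLine (rest.drop (cs - 1 - (k : Int)).toNat)).map
      (· + (cs - 1 - (k : Int)).toNat) := by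
  induction rest with
  | nil => intro k; simp [fc2]
  | cons line rest ih =>
    intro k
    by_cases hk : (k : Int) + 1 ≥ cs
    · have hm : (cs - 1 - (k : Int)).toNat = 0 := by omega
      have hm' : (cs - 1 - ((k : Int) + 1)).toNat = 0 := by omega
      rw [hm]
      simp only [fc2, List.drop_zero, List.findIdx?_cons]
      by_cases hb : bLine line
      · simp [hk, hb]
      · have := ih (k + 1)
        push_cast at this
        rw [hm'] at this
        simp [hk, hb, this, Option.map_map, Function.comp_def]
    · have hm : ∃ m : Nat, (cs - 1 - (k : Int)).toNat = m + 1 ∧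
          (cs - 1 - ((k : Int) + 1)).toNat = m := by
        refine ⟨(cs - 1 - ((k : Int) + 1)).toNat, by omega, rfl⟩
      obtain ⟨m, hm1, hm2⟩ := hm
      have hcond : ¬ ((k : Int) + 1 ≥ cs && bLine line) = true := by
        simp [hk]
      simp only [fc2, if_neg hcond, hm1, List.drop_succ_cons]
      have := ih (k + 1)
      push_cast at this
      rw [hm2] at this
      rw [this, Option.map_map]
      rfl

theorem bFindCut_findIdx (lines : List String) (i : Nat) :
    bFindCut lines i = (List.findIdx? bLine (lines.drop i)).map (· + i) := by
  unfold bFindCut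
  split
  · rename_i h
    rw [List.drop_eq_getElem_cons h, List.findIdx?_cons]
    by_cases hb : bLine lines[i]
    · simp [hb]
    · simp only [hb, if_neg, Bool.false_eq_true, not_false_eq_true]
      rw [bFindCut_findIdx lines (i + 1), Option.map_map]
      congr 1
      funext x
      simp [Function.comp]
      omega
  · rename_i h
    rw [List.drop_eq_nil_of_le (by omega)]
    simp
termination_by lines.length - i

theorem fc2_eq_bFindCut (cs : Int) (rest : List String) :
    fc2 cs 0 rest = bFindCut rest (cs - 1).toNat := by
  rw [fc2_findIdx cs rest 0, bFindCut_findIdx]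
  norm_num

theorem bChunks_some (cs : Int) (rest : List String) (cut : Nat)
    (hr : rest ≠ []) (h : bFindCut rest (cs - 1).toNat = some cut) :
    bChunks cs rest =
      PySem.Str.join "\n" (PySem.List.slice rest none (some ((cut : Int) + 1))) ::
      bChunks cs (PySem.List.slice rest (some ((cut : Int) + 1))) := by
  conv_lhs => rw [bChunks]
  rw [dif_neg hr]
  split
  · rename_i heq; rw [h] at heq; cases heq
  · rename_i c heq; rw [h] at heq; cases heq; rfl

theorem foldA (cs : Int) (rest : List String) : ∀ (chunks cur : List String),
    rest.foldl (aStep cs) (chunks, cur) =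
      match fc2 cs cur.length rest with
      | none => (chunks, cur ++ rest)
      | some i => (rest.drop (i + 1)).foldl (aStep cs)
          (chunks ++ [PySem.Str.join "\n" (cur ++ rest.take (i + 1))], []) := by
  induction rest with
  | nil => intro chunks cur; simp [fc2]
  | cons line rest ih =>
    intro chunks cur
    by_cases hc : ((cur.length : Int) + 1 ≥ cs && bLine line) = true
    · have hstep : aStep cs (chunks, cur) line =
          (chunks ++ [PySem.Str.join "\n" (cur ++ [line])], []) := by
        simp only [aStep]
        rw [if_pos (by simpa using hc)]
      simp only [List.foldl_cons, hstep, fc2, if_pos hc]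
      simp
    · have hstep : aStep cs (chunks, cur) line = (chunks, cur ++ [line]) := by
        simp only [aStep]
        rw [if_neg (by simpa using hc)]
      simp only [List.foldl_cons, hstep, fc2, if_neg hc]
      rw [ih chunks (cur ++ [line])]
      simp only [List.length_append, List.length_cons, List.length_nil]
      cases fc2 cs (cur.length + 1) rest with
      | none => simp
      | some i => simp [List.append_assoc]

theorem mainLoop (cs : Int) (rest : List String) : ∀ (chunks : List String),
    finA (rest.foldl (aStep cs) (chunks, [])) = chunks ++ bChunks cs rest := by
  intro chunks
  rw [foldA]
  simp only [List.length_nil]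
  rw [fc2_eq_bFindCut]
  cases h : bFindCut rest (cs - 1).toNat with
  | none =>
    simp only [List.nil_append]
    unfold bChunks
    by_cases hr : rest = []
    · subst hr; simp [finA]
    · rw [dif_neg hr]
      rw [h]
      simp [finA, hr]
  | some i =>
    have hi := bFindCut_lt rest _ i h
    have hr : rest ≠ [] := by
      intro h0; subst h0; simp at hi
    rw [mainLoop cs (rest.drop (i + 1)) (chunks ++ [PySem.Str.join "\n" ([] ++ rest.take (i + 1))])]
    rw [bChunks_some cs rest i hr h]
    rw [PySem.List.slice_to _ (by omega : (0:Int) ≤ (i : Int) + 1),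
        PySem.List.slice_from _ (by omega : (0:Int) ≤ (i : Int) + 1)]
    have : ((i : Int) + 1).toNat = i + 1 := by omega
    rw [this]
    simp [List.append_assoc]
  termination_by rest.length
  decreasing_by
    simp only [List.length_drop]
    omega

theorem ports_eq (latex : String) (chunk_size : Int) :
    chunk_latex_py latex chunk_size = chunk_latex_py_alt latex chunk_size := by
  unfold chunk_latex_py chunk_latex_py_alt
  by_cases h : ((pySplitNL latex).length : Int) ≤ chunk_size
  · simp [h]
  · simp only [if_neg h]
    exact mainLoop chunk_size (pySplitNL latex) []

-- ===== VERDICT (by name: the statement is the Claim_ definition above) =====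
theorem chunk_latex_py_spec : Claim_equal_chunk_latex_py := by
  intro latex chunk_size _
  unfold Spec_chunk_latex_py
  exact ports_eq latex chunk_size
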